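-- pv_equiv track=rewrite | github.com/rahenry/1Dphysics | exact_fp.py | make_coords
-- ===== SOURCE A (Python) =====
-- def make_coords(L, n):
--     res = [[x] for x in range(L)]
--     for i in range(n-1):
--         res_new = []
--         for x in res:
--             for j in range(L):
--                 if j in x:
--                     break
--                 res_new.append([*x, j])
--         res = res_new
--     return res
-- ===== SOURCE B (Python) =====
-- def make_coords(L, n):
--     def gen(k, bound):
--         if k <= 1:
--             return [[v] for v in range(bound)]
--         out = []
--         for a in range(bound):
--             for tail in gen(k - 1, a):
--                 out.append([a] + tail)
--         return out
--     return gen(n, L)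
-- ===== Notes on version B (the rewrite author's own statement) =====
-- stated objective: alternative
-- what changed: Replaces A's iterative breadth-first expansion (n-1 passes, each rescanning range(L) with a break per partial sequence) by a depth-first recursion gen(k, bound) on the sequence length that prepends each first element to the recursively generated shorter tails, producing the same lists in the same order.
import Mathlib
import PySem

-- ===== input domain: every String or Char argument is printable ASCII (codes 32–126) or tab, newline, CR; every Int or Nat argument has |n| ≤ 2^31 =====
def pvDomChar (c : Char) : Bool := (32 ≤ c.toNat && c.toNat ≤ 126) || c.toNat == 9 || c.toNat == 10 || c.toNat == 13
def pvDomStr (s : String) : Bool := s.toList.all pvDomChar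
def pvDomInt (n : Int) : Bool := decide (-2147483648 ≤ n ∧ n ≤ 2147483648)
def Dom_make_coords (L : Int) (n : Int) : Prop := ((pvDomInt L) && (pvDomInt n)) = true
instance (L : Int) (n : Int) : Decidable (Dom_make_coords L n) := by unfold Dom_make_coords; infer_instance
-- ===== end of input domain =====

-- B replaces A's iterative per-position expansion by a depth-first recursion on the
-- sequence length (objective: alternative decomposition, same output and order).

-- ===== PORT A =====
-- inner 'for j in range(L): if j in x: break; res_new.append([*x, j])' loop
def pvExtLoop (x : List Int) : List Int → List (List Int)
  | [] => []
  | j :: js => if x.contains j then [] else (x ++ [j]) :: pvExtLoop x js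

-- one pass of A's outer 'for x in res' loop, building res_new
def pvStep (L : Int) (res : List (List Int)) : List (List Int) :=
  res.foldl (fun acc x => acc ++ pvExtLoop x (PySem.List.pyRange 0 L 1)) []

def make_coords (L : Int) (n : Int) : List (List Int) :=
  (PySem.List.pyRange 0 (n - 1) 1).foldl (fun res _ => pvStep L res)
    ((PySem.List.pyRange 0 L 1).map (fun x => [x]))

-- ===== PORT B =====
-- recursive helper gen(k, bound): strictly decreasing length-k sequences over 0..bound-1
def pvGen : Nat → Int → List (List Int)
  | 0, bound => (PySem.List.pyRange 0 bound 1).map (fun v => [v])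
  | 1, bound => (PySem.List.pyRange 0 bound 1).map (fun v => [v])
  | (k + 2), bound =>
      (PySem.List.pyRange 0 bound 1).foldl
        (fun out a => out ++ (pvGen (k + 1) a).map (fun tail => a :: tail)) []

def make_coords_alt (L : Int) (n : Int) : List (List Int) := pvGen n.toNat L

-- ===== PRECONDITION & SPEC =====
def Spec_make_coords (L : Int) (n : Int) (out : List (List Int)) : Prop := out = make_coords_alt L n
instance (L : Int) (n : Int) (out : List (List Int)) : Decidable (Spec_make_coords L n out) := by unfold Spec_make_coords; infer_instance

-- ===== CLAIM (what is proved, stated in full; the proofs are below) =====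
def Claim_equal_make_coords : Prop := ∀ (L : Int) (n : Int), Dom_make_coords L n → Spec_make_coords L n (make_coords L n)

-- ===== LEMMAS AND PROOFS =====

-- proof-side enumeration: pvG (k+1) b = strictly decreasing (k+1)-sequences over [0,b)
def pvG : Nat → Int → List (List Int)
  | 0, _ => [[]]
  | (k + 1), b => (PySem.List.pyRange 0 b 1).flatMap (fun a => (pvG k a).map (fun t => a :: t))

theorem pvFlatMap_single (l : List Int) : l.flatMap (fun a => [[a]]) = l.map (fun a => [a]) := by
  induction l with
  | nil => rfl
  | cons a l ih => simp [List.flatMap_cons, ih]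

theorem pvFlatMap_congr {α β : Type} (l : List α) (f g : α → List β)
    (h : ∀ x ∈ l, f x = g x) : l.flatMap f = l.flatMap g := by
  induction l with
  | nil => rfl
  | cons a l ih =>
      simp only [List.flatMap_cons]
      rw [h a (List.mem_cons_self), ih (fun x hx => h x (List.mem_cons_of_mem _ hx))]

theorem pvGen_eq_pvG : ∀ (k : Nat) (b : Int), pvGen (k + 1) b = pvG (k + 1) b := by
  intro k
  induction k with
  | zero => intro b; simp [pvGen, pvG, pvFlatMap_single]
  | succ k ih =>
      intro b
      show pvGen (k + 2) b = pvG (k + 2) b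
      simp only [pvGen, PySem.List.foldl_append_eq_flatMap, List.nil_append, ih]
      rfl

theorem pvGen_zero (b : Int) : pvGen 0 b = pvG 1 b := by
  simp [pvGen, pvG, pvFlatMap_single]

theorem pvG_ne_nil (k : Nat) (b : Int) (x : List Int) (hx : x ∈ pvG (k + 1) b) : x ≠ [] := by
  rcases k with _ | k <;>
    · simp only [pvG, List.mem_flatMap, List.mem_map] at hx
      obtain ⟨a, -, t, -, rfl⟩ := hx
      simp

theorem pvGetLastD_cons_of_ne_nil (a : Int) (t : List Int) (ht : t ≠ []) :
    (a :: t).getLastD 0 = t.getLastD 0 := by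
  obtain ⟨m, hm⟩ : ∃ m, t.getLast? = some m :=
    Option.isSome_iff_exists.mp (List.getLast?_isSome.mpr ht)
  rw [List.getLastD_cons, List.getLastD_eq_getLast?, List.getLastD_eq_getLast?, hm]
  rfl

theorem pvG_props : ∀ (k : Nat) (b : Int), ∀ x ∈ pvG (k + 1) b,
    0 ≤ x.getLastD 0 ∧ x.getLastD 0 < b ∧ x.getLastD 0 ∈ x ∧
      ∀ j : Int, 0 ≤ j → j < x.getLastD 0 → j ∉ x := by
  intro k
  induction k with
  | zero =>
      intro b x hx
      have hx' : x ∈ (PySem.List.pyRange 0 b 1).flatMap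
          (fun a => (pvG 0 a).map (fun t => a :: t)) := hx
      rcases List.mem_flatMap.mp hx' with ⟨a, ha, hm⟩
      rcases List.mem_map.mp hm with ⟨t, ht, rfl⟩
      have htn : t = [] := by simpa [pvG] using ht
      subst htn
      rw [PySem.List.mem_pyRange_one] at ha
      have hLa : ([a] : List Int).getLastD 0 = a := rfl
      rw [hLa]
      refine ⟨ha.1, ha.2, by simp, ?_⟩
      intro j hj0 hj hmem
      have : j = a := by simpa using hmem
      omega
  | succ k ih =>
      intro b x hx
      have hx' : x ∈ (PySem.List.pyRange 0 b 1).flatMap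
          (fun a => (pvG (k + 1) a).map (fun t => a :: t)) := hx
      rcases List.mem_flatMap.mp hx' with ⟨a, ha, hm⟩
      rcases List.mem_map.mp hm with ⟨t, ht, rfl⟩
      rw [PySem.List.mem_pyRange_one] at ha
      have htne : t ≠ [] := pvG_ne_nil k a t ht
      have hlast : (a :: t).getLastD 0 = t.getLastD 0 := pvGetLastD_cons_of_ne_nil a t htne
      obtain ⟨h0, hlt, hmem, hmin⟩ := ih a t ht
      rw [hlast]
      refine ⟨h0, by omega, List.mem_cons_of_mem _ hmem, ?_⟩
      intro j hj0 hjm hmem'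
      rcases List.mem_cons.mp hmem' with h | h
      · omega
      · exact hmin j hj0 hjm h

theorem pvExtLoop_range (x : List Int) (m LL : Int)
    (hmem : m ∈ x) (hmin : ∀ j : Int, 0 ≤ j → j < m → j ∉ x) (hmL : m < LL) :
    ∀ s : Int, 0 ≤ s → s ≤ m →
      pvExtLoop x (PySem.List.pyRange s LL 1) =
        (PySem.List.pyRange s m 1).map (fun j => x ++ [j]) := by
  suffices H : ∀ (fuel : Nat) (s : Int), (m - s).toNat ≤ fuel → 0 ≤ s → s ≤ m →
      pvExtLoop x (PySem.List.pyRange s LL 1) =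
        (PySem.List.pyRange s m 1).map (fun j => x ++ [j]) by
    intro s h0 h1; exact H (m - s).toNat s le_rfl h0 h1
  intro fuel
  induction fuel with
  | zero =>
      intro s hf h0 h1
      have hsm : s = m := by omega
      subst hsm
      rw [PySem.List.pyRange_one_cons (by omega : s < LL)]
      simp only [pvExtLoop]
      rw [if_pos (List.elem_eq_true_of_mem hmem)]
      rw [PySem.List.pyRange_one_eq_nil le_rfl]
      rfl
  | succ fuel ih =>
      intro s hf h0 h1
      rcases eq_or_lt_of_le h1 with hsm | hsm
      · subst hsm
        rw [PySem.List.pyRange_one_cons (by omega : s < LL)]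
        simp only [pvExtLoop]
        rw [if_pos (List.elem_eq_true_of_mem hmem)]
        rw [PySem.List.pyRange_one_eq_nil le_rfl]
        rfl
      · rw [PySem.List.pyRange_one_cons (by omega : s < LL)]
        simp only [pvExtLoop]
        have hns : s ∉ x := hmin s h0 hsm
        rw [if_neg (by simpa using hns)]
        rw [PySem.List.pyRange_one_cons hsm]
        rw [ih (s + 1) (by omega) (by omega) (by omega)]
        rfl

theorem pvSnocG : ∀ (k : Nat) (b : Int),
    (pvG (k + 1) b).flatMap
        (fun x => (PySem.List.pyRange 0 (x.getLastD 0) 1).map (fun j => x ++ [j]))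
      = pvG (k + 2) b := by
  intro k
  induction k with
  | zero =>
      intro b
      show _ = pvG 2 b
      simp [pvG, pvFlatMap_single, List.flatMap_map, List.map_map, Function.comp_def]
  | succ k ih =>
      intro b
      show (pvG (k + 2) b).flatMap _ = pvG (k + 3) b
      conv_lhs => rw [show pvG (k + 2) b =
        (PySem.List.pyRange 0 b 1).flatMap (fun a => (pvG (k + 1) a).map (fun t => a :: t))
        from rfl]
      rw [List.flatMap_assoc]
      show _ = (PySem.List.pyRange 0 b 1).flatMap (fun a => (pvG (k + 2) a).map (fun t => a :: t))
      refine pvFlatMap_congr _ _ _ (fun a _ => ?_)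
      rw [List.flatMap_map]
      have hinner : (pvG (k + 1) a).flatMap
          (fun t => (PySem.List.pyRange 0 ((a :: t).getLastD 0) 1).map (fun j => a :: t ++ [j]))
          = (pvG (k + 1) a).flatMap
          (fun t => ((PySem.List.pyRange 0 (t.getLastD 0) 1).map (fun j => t ++ [j])).map
              (fun y => a :: y)) := by
        refine pvFlatMap_congr _ _ _ (fun t ht => ?_)
        rw [pvGetLastD_cons_of_ne_nil a t (pvG_ne_nil k a t ht), List.map_map]
        rfl
      rw [hinner, ← List.map_flatMap, ih a]

theorem pvStep_G (L : Int) (k : Nat) : pvStep L (pvG (k + 1) L) = pvG (k + 2) L := by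
  unfold pvStep
  rw [PySem.List.foldl_append_eq_flatMap, List.nil_append]
  rw [pvFlatMap_congr _ _
    (fun x => (PySem.List.pyRange 0 (x.getLastD 0) 1).map (fun j => x ++ [j])) ?_]
  · exact pvSnocG k L
  · intro x hx
    obtain ⟨h0, hlt, hmem, hmin⟩ := pvG_props k L x hx
    exact pvExtLoop_range x _ L hmem hmin hlt 0 le_rfl h0

theorem pvFold_G (L : Int) : ∀ (l : List Int) (k : Nat),
    l.foldl (fun res _ => pvStep L res) (pvG (k + 1) L) = pvG (k + 1 + l.length) L := by
  intro l
  induction l with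
  | nil => intro k; simp
  | cons a l ih =>
      intro k
      simp only [List.foldl_cons, pvStep_G, List.length_cons]
      have := ih (k + 1)
      simpa [Nat.add_assoc, Nat.add_comm, Nat.add_left_comm] using this

-- ===== VERDICT (by name: the statement is the Claim_ definition above) =====
theorem make_coords_spec : Claim_equal_make_coords := by
  intro L n _
  show make_coords L n = make_coords_alt L n
  unfold make_coords make_coords_alt
  rw [show (PySem.List.pyRange 0 L 1).map (fun x => [x]) = pvG 1 L from pvGen_zero L]
  rw [pvFold_G L _ 0]
  have hlen : (PySem.List.pyRange 0 (n - 1) 1).length = (n - 1).toNat := by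
    simp [PySem.List.length_pyRange_one]
  rw [hlen]
  by_cases h : n ≤ 0
  · have h1 : (n - 1).toNat = 0 := by omega
    have h2 : n.toNat = 0 := by omega
    rw [h1, h2, pvGen_zero]
  · have h2 : n.toNat = (n - 1).toNat + 1 := by omega
    rw [h2, pvGen_eq_pvG]
    congr 1
    omega
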